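-- pv_equiv track=rewrite | github.com/rahvis/scholar_citations | scholar_citations/parsers.py | has_author_overlap
-- ===== SOURCE A (Python) =====
-- def similar_authors(author1, author2, threshold=0.7):
--     """Check if two author names are similar using more sophisticated matching."""
--     # Direct match
--     if author1 == author2:
--         return True
--
--     # Split names into words
--     words1 = author1.split()
--     words2 = author2.split()
--
--     # Check if one name is just the last name of the other
--     if len(words1) > 1 and len(words2) == 1:
--         if words1[-1] == words2[0]:  # Last name of author1 matches the single name of author2
--             return True
--     elif len(words2) > 1 and len(words1) == 1:
--         if words2[-1] == words1[0]:  # Last name of author2 matches the single name of author1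
--             return True
--
--     # Check if last names match
--     if words1 and words2 and words1[-1] == words2[-1]:
--         # Check initials if present
--         if len(words1) > 1 and len(words2) > 1:
--             # Compare first initials
--             if words1[0][0] == words2[0][0]:
--                 return True
--     return False
--
-- def has_author_overlap(authors1, authors2):
--     """Check if there is any overlap between two lists of author names."""
--     if not authors1 or not authors2:
--         return False
--
--     for a1 in authors1:
--         for a2 in authors2:
--             if similar_authors(a1, a2):
--                 return True
--
--     return False
-- ===== SOURCE B (Python) =====
-- def has_author_overlap(authors1, authors2):
--     """Check if there is any overlap between two lists of author names.
--
--     Index authors2 once by exact string, single-name, multi-word last name and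
--     (last name, first initial) keys, then answer each authors1 entry by set lookups.
--     """
--     exact = set(authors2)
--     single = set()        # the name word of single-word entries
--     last_multi = set()    # last names of multi-word entries
--     last_init = set()     # (last name, first initial) of multi-word entries
--     for a in authors2:
--         w = a.split()
--         if len(w) == 1:
--             single.add(w[0])
--         elif len(w) > 1:
--             last_multi.add(w[-1])
--             last_init.add((w[-1], w[0][0]))
--     for a in authors1:
--         w = a.split()
--         if a in exact:
--             return True
--         if len(w) > 1 and (w[-1] in single or (w[-1], w[0][0]) in last_init):
--             return True
--         if len(w) == 1 and w[0] in last_multi: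
--             return True
--     return False
-- ===== Notes on version B (the rewrite author's own statement) =====
-- stated objective: alternative
-- what changed: Replaces the nested authors1 x authors2 scan with fuzzy per-pair matching by a one-pass index of authors2 (exact strings, single names, multi-word last names and (last name, first initial) pairs in hash sets), so each authors1 entry is answered by set lookups instead of an inner scan.
import Mathlib
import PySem

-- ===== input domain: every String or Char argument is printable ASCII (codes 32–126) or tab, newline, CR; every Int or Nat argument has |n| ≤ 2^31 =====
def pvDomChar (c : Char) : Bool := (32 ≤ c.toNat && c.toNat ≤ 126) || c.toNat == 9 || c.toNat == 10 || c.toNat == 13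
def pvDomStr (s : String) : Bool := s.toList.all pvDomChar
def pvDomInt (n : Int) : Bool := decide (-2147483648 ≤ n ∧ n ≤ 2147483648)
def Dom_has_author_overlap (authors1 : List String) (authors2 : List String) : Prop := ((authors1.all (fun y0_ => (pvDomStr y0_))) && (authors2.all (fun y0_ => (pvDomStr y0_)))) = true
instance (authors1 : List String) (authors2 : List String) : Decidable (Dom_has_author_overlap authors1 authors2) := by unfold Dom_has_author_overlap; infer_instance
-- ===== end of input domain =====

-- B replaces A's nested per-pair fuzzy scan by a one-pass index of authors2 (exact / single-name /
-- last-name / (last name, first initial) sets) queried per authors1 entry: objective = alternative.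

-- ===== PORT A =====
-- words[-1], words[0] and words[0][0] as they appear in A (guarded there, total here via getD/Option)
def pvLastWord (w : List String) : String := (PySem.List.pyGet? w (-1)).getD ""
def pvFirstWord (w : List String) : String := (PySem.List.pyGet? w 0).getD ""
def pvFirstInit (w : List String) : Option Char := PySem.Str.pyGet? (pvFirstWord w) 0

def similar_authors (author1 : String) (author2 : String) : Bool :=
  if author1 == author2 then true
  else
    let words1 := PySem.Str.split₀ author1
    let words2 := PySem.Str.split₀ author2
    -- the final "last names match" check, reached when no earlier branch returned
    let lastCheck : Bool :=
      if !words1.isEmpty && !words2.isEmpty && pvLastWord words1 == pvLastWord words2 then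
        if 1 < words1.length && 1 < words2.length then
          pvFirstInit words1 == pvFirstInit words2
        else false
      else false
    if 1 < words1.length && words2.length == 1 then
      if pvLastWord words1 == pvFirstWord words2 then true else lastCheck
    else if 1 < words2.length && words1.length == 1 then
      if pvLastWord words2 == pvFirstWord words1 then true else lastCheck
    else lastCheck

def overlapInner (a1 : String) : List String → Bool
  | [] => false
  | a2 :: rest => if similar_authors a1 a2 then true else overlapInner a1 rest

def overlapOuter : List String → List String → Bool
  | [], _ => false
  | a1 :: rest, l2 => if overlapInner a1 l2 then true else overlapOuter rest l2

def has_author_overlap (authors1 : List String) (authors2 : List String) : Bool :=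
  if authors1.isEmpty || authors2.isEmpty then false
  else overlapOuter authors1 authors2

-- ===== PORT B =====
-- index state: (single-word names, last names of multi-word names, (last name, first initial) pairs)
def altStep (st : PySem.Set String × PySem.Set String × PySem.Set (String × Option Char))
    (a : String) : PySem.Set String × PySem.Set String × PySem.Set (String × Option Char) :=
  let w := PySem.Str.split₀ a
  if w.length == 1 then (PySem.Set.add st.1 (pvFirstWord w), st.2.1, st.2.2)
  else if 1 < w.length then
    (st.1, PySem.Set.add st.2.1 (pvLastWord w),
     PySem.Set.add st.2.2 (pvLastWord w, pvFirstInit w))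
  else st

def altQuery (exact : PySem.Set String) (single : PySem.Set String)
    (lastMulti : PySem.Set String) (lastInit : PySem.Set (String × Option Char)) :
    List String → Bool
  | [] => false
  | a :: rest =>
    let w := PySem.Str.split₀ a
    if PySem.Set.contains exact a then true
    else if 1 < w.length &&
        (PySem.Set.contains single (pvLastWord w) ||
         PySem.Set.contains lastInit (pvLastWord w, pvFirstInit w)) then true
    else if w.length == 1 && PySem.Set.contains lastMulti (pvFirstWord w) then true
    else altQuery exact single lastMulti lastInit rest

def has_author_overlap_alt (authors1 : List String) (authors2 : List String) : Bool :=
  let exact := PySem.Set.ofList authors2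
  let idx := authors2.foldl altStep (PySem.Set.empty, PySem.Set.empty, PySem.Set.empty)
  altQuery exact idx.1 idx.2.1 idx.2.2 authors1

-- ===== PRECONDITION & SPEC =====
def Spec_has_author_overlap (authors1 : List String) (authors2 : List String) (out : Bool) : Prop := out = has_author_overlap_alt authors1 authors2
instance (authors1 : List String) (authors2 : List String) (out : Bool) : Decidable (Spec_has_author_overlap authors1 authors2 out) := by unfold Spec_has_author_overlap; infer_instance

-- ===== CLAIM (what is proved, stated in full; the proofs are below) =====
def Claim_equal_has_author_overlap : Prop := ∀ (authors1 : List String) (authors2 : List String), Dom_has_author_overlap authors1 authors2 → Spec_has_author_overlap authors1 authors2 (has_author_overlap authors1 authors2)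

-- ===== LEMMAS AND PROOFS =====

-- characterisation of similar_authors as a four-way disjunction
lemma similar_iff (a1 a2 : String) :
    similar_authors a1 a2 = true ↔
      a1 = a2 ∨
      (1 < (PySem.Str.split₀ a1).length ∧ (PySem.Str.split₀ a2).length = 1 ∧
        pvLastWord (PySem.Str.split₀ a1) = pvFirstWord (PySem.Str.split₀ a2)) ∨
      (1 < (PySem.Str.split₀ a2).length ∧ (PySem.Str.split₀ a1).length = 1 ∧
        pvLastWord (PySem.Str.split₀ a2) = pvFirstWord (PySem.Str.split₀ a1)) ∨
      (1 < (PySem.Str.split₀ a1).length ∧ 1 < (PySem.Str.split₀ a2).length ∧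
        pvLastWord (PySem.Str.split₀ a1) = pvLastWord (PySem.Str.split₀ a2) ∧
        pvFirstInit (PySem.Str.split₀ a1) = pvFirstInit (PySem.Str.split₀ a2)) := by
  unfold similar_authors
  by_cases h : a1 = a2
  · simp [h]
  · simp only [beq_iff_eq, h, if_false]
    split_ifs <;> simp_all <;>
      first
        | omega
        | (intro p q r
           rename_i hL
           exact (hL (by intro e; rw [e] at p; simp at p)
             (by intro e; rw [e] at q; simp at q) r).elim)

lemma overlapInner_eq_any (a1 : String) (l : List String) :
    overlapInner a1 l = l.any (fun a2 => similar_authors a1 a2) := by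
  induction l with
  | nil => rfl
  | cons h t ih =>
    simp only [overlapInner, List.any_cons, ih]
    cases similar_authors a1 h <;> simp

lemma overlapOuter_eq_any (l1 l2 : List String) :
    overlapOuter l1 l2 = l1.any (fun a1 => l2.any (fun a2 => similar_authors a1 a2)) := by
  induction l1 with
  | nil => rfl
  | cons h t ih =>
    simp only [overlapOuter, List.any_cons, overlapInner_eq_any, ih]
    cases l2.any (fun a2 => similar_authors h a2) <;> simp

lemma hao_eq_any (l1 l2 : List String) :
    has_author_overlap l1 l2 = l1.any (fun a1 => l2.any (fun a2 => similar_authors a1 a2)) := by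
  unfold has_author_overlap
  split_ifs with h
  · rcases (by simpa [List.isEmpty_iff] using h) with h' | h' <;> simp [h']
  · exact overlapOuter_eq_any l1 l2

-- components of one indexing step
lemma altStep_fst (st : PySem.Set String × PySem.Set String × PySem.Set (String × Option Char)) (a : String) :
    (altStep st a).1 = if (PySem.Str.split₀ a).length = 1
      then PySem.Set.add st.1 (pvFirstWord (PySem.Str.split₀ a)) else st.1 := by
  simp only [altStep]; split_ifs <;> simp_all

lemma altStep_snd1 (st : PySem.Set String × PySem.Set String × PySem.Set (String × Option Char)) (a : String) :
    (altStep st a).2.1 = if 1 < (PySem.Str.split₀ a).length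
      then PySem.Set.add st.2.1 (pvLastWord (PySem.Str.split₀ a)) else st.2.1 := by
  simp only [altStep]; split_ifs <;> simp_all

lemma altStep_snd2 (st : PySem.Set String × PySem.Set String × PySem.Set (String × Option Char)) (a : String) :
    (altStep st a).2.2 = if 1 < (PySem.Str.split₀ a).length
      then PySem.Set.add st.2.2 (pvLastWord (PySem.Str.split₀ a), pvFirstInit (PySem.Str.split₀ a))
      else st.2.2 := by
  simp only [altStep]; split_ifs <;> simp_all

-- membership in the three components of the folded index
lemma mem_fold_fst (l : List String)
    (st : PySem.Set String × PySem.Set String × PySem.Set (String × Option Char)) (x : String) :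
    x ∈ (l.foldl altStep st).1 ↔
      x ∈ st.1 ∨ ∃ a ∈ l, (PySem.Str.split₀ a).length = 1 ∧ x = pvFirstWord (PySem.Str.split₀ a) := by
  induction l generalizing st with
  | nil => simp
  | cons h t ih =>
    rw [List.foldl_cons, ih, altStep_fst]
    split_ifs with hc <;>
      simp only [PySem.Set.mem_add, List.exists_mem_cons_iff] <;> tauto

lemma mem_fold_snd1 (l : List String)
    (st : PySem.Set String × PySem.Set String × PySem.Set (String × Option Char)) (x : String) :
    x ∈ (l.foldl altStep st).2.1 ↔
      x ∈ st.2.1 ∨ ∃ a ∈ l, 1 < (PySem.Str.split₀ a).length ∧ x = pvLastWord (PySem.Str.split₀ a) := by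
  induction l generalizing st with
  | nil => simp
  | cons h t ih =>
    rw [List.foldl_cons, ih, altStep_snd1]
    split_ifs with hc <;>
      simp only [PySem.Set.mem_add, List.exists_mem_cons_iff] <;> tauto

lemma mem_fold_snd2 (l : List String)
    (st : PySem.Set String × PySem.Set String × PySem.Set (String × Option Char)) (x : String × Option Char) :
    x ∈ (l.foldl altStep st).2.2 ↔
      x ∈ st.2.2 ∨ ∃ a ∈ l, 1 < (PySem.Str.split₀ a).length ∧
        x = (pvLastWord (PySem.Str.split₀ a), pvFirstInit (PySem.Str.split₀ a)) := by
  induction l generalizing st with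
  | nil => simp
  | cons h t ih =>
    rw [List.foldl_cons, ih, altStep_snd2]
    split_ifs with hc <;>
      simp only [PySem.Set.mem_add, List.exists_mem_cons_iff] <;> tauto

lemma altQuery_eq_any (e s m : PySem.Set String) (i : PySem.Set (String × Option Char))
    (l : List String) :
    altQuery e s m i l = l.any (fun a =>
      let w := PySem.Str.split₀ a
      PySem.Set.contains e a ||
      (decide (1 < w.length) &&
        (PySem.Set.contains s (pvLastWord w) || PySem.Set.contains i (pvLastWord w, pvFirstInit w))) ||
      (w.length == 1 && PySem.Set.contains m (pvFirstWord w))) := by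
  induction l with
  | nil => rfl
  | cons h t ih =>
    simp only [altQuery, List.any_cons, ih]
    split_ifs <;> simp_all

-- ===== VERDICT (by name: the statement is the Claim_ definition above) =====
set_option maxHeartbeats 1000000 in
theorem has_author_overlap_spec : Claim_equal_has_author_overlap := by
  intro l1 l2 _
  unfold Spec_has_author_overlap has_author_overlap_alt
  rw [hao_eq_any, altQuery_eq_any]
  refine List.any_congr rfl (fun a1 => ?_)
  have m1 := mem_fold_fst l2 ([], [], [])
  have m2 := mem_fold_snd1 l2 ([], [], [])
  have m3 := mem_fold_snd2 l2 ([], [], [])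
  simp only [List.not_mem_nil, false_or] at m1 m2 m3
  rw [Bool.eq_iff_iff]
  simp only [List.any_eq_true, similar_iff, PySem.Set.contains_iff, PySem.Set.mem_ofList,
    Bool.or_eq_true, Bool.and_eq_true, decide_eq_true_eq, beq_iff_eq, m1, m2, m3,
    PySem.Set.empty, List.not_mem_nil, false_or]
  constructor
  · rintro ⟨x, hx, rfl | ⟨h1, h2, h3⟩ | ⟨h1, h2, h3⟩ | ⟨h1, h2, h3, h4⟩⟩
    · exact Or.inl (Or.inl hx)
    · exact Or.inl (Or.inr ⟨h1, Or.inl ⟨x, hx, h2, h3⟩⟩)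
    · exact Or.inr ⟨h2, x, hx, h1, h3.symm⟩
    · exact Or.inl (Or.inr ⟨h1, Or.inr ⟨x, hx, h2, by rw [h3, h4]⟩⟩)
  · rintro ((h | ⟨h1, ⟨a, ha, p1, p2⟩ | ⟨a, ha, p1, p2⟩⟩) | ⟨h1, a, ha, p1, p2⟩)
    · exact ⟨a1, h, Or.inl rfl⟩
    · exact ⟨a, ha, Or.inr (Or.inl ⟨h1, p1, p2⟩)⟩
    · exact ⟨a, ha, Or.inr (Or.inr (Or.inr ⟨h1, p1, congrArg Prod.fst p2, congrArg Prod.snd p2⟩))⟩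
    · exact ⟨a, ha, Or.inr (Or.inr (Or.inl ⟨p1, h1, p2.symm⟩))⟩
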